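-- pv_equiv track=rewrite | github.com/mallocaholic/ihs-gthero-map | test.py | retSS
-- ===== SOURCE A (Python) =====
-- mapping = {'0': '40', '1': '79', '2': '24', '3': '30', '4': '19', '5': '12', '6': '02', '7': '78', '8': '00', '9': '10'}
--
-- def retSS(val):
-- 	val_str = str(val)
-- 	str_emp = ""
--
-- 	for number in val_str:
-- 		str_emp += mapping[number]
--
-- 	while(len(str_emp) < 8):
-- 		str_emp = mapping['0'] + str_emp
--
-- 	return int(str_emp, 16)
-- ===== SOURCE B (Python) =====
-- mapping = {'0': '40', '1': '79', '2': '24', '3': '30', '4': '19', '5': '12', '6': '02', '7': '78', '8': '00', '9': '10'}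
--
-- # byte value of each digit, precomputed once from the same mapping
-- byteval = {d: int(h, 16) for d, h in mapping.items()}
--
-- def retSS(val):
-- 	bv = [byteval[d] for d in str(val)]
-- 	bv = [0x40] * (4 - len(bv)) + bv
-- 	result = 0
-- 	for b in bv:
-- 		result = result * 256 + b
-- 	return result
-- ===== Notes on version B (the rewrite author's own statement) =====
-- stated objective: alternative
-- what changed: B precomputes a digit->byte table from the same mapping and accumulates the result directly with a base-256 Horner fold over a 64-padded byte list, instead of A's building an 8+-char hex string and re-parsing it with int(s, 16).
import Mathlib
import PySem

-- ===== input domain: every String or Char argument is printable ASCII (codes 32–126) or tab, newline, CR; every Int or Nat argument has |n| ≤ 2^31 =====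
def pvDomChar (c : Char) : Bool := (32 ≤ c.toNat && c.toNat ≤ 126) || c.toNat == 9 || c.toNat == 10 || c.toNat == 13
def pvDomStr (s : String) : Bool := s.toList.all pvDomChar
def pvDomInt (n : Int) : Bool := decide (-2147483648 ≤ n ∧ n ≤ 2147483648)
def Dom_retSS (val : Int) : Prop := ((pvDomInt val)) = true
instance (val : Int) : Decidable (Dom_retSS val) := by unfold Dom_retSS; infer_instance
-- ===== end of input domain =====

-- B replaces A's hex-string building + int(s,16) parse by direct byte values and a base-256
-- Horner fold (objective: alternative decomposition; return value only, no mutation involved).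

-- ===== PORT A =====
-- module constant: mapping = {'0': '40', …} (keys are the single digit chars, values as char lists)
def pvMapping : PySem.Dict Char (List Char) :=
  PySem.Dict.ofList
    [('0', ['4','0']), ('1', ['7','9']), ('2', ['2','4']), ('3', ['3','0']), ('4', ['1','9']),
     ('5', ['1','2']), ('6', ['0','2']), ('7', ['7','8']), ('8', ['0','0']), ('9', ['1','0'])]

-- hex value of one char; exact for '0'-'9'/'a'-'f'/'A'-'F' (the only chars reaching it under Pre_)
def pvHexDigit (c : Char) : Int :=
  if '0' ≤ c ∧ c ≤ '9' then (c.toNat : Int) - 48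
  else if 'a' ≤ c ∧ c ≤ 'f' then (c.toNat : Int) - 87
  else if 'A' ≤ c ∧ c ≤ 'F' then (c.toNat : Int) - 55
  else 0

-- int(str_emp, 16), hand-ported as the base-16 positional value: exact for the strings A's loop
-- builds under Pre_retSS (nonempty, hex digits only, no sign/whitespace/underscore/'0x' prefix)
def pvHexVal (cs : List Char) : Int := cs.foldl (fun a c => a * 16 + pvHexDigit c) 0

-- while len(str_emp) < 8: str_emp = mapping['0'] + str_emp   (mapping['0'] = "40")
def pvPad8 (s : List Char) : List Char :=
  if s.length < 8 then pvPad8 ('4' :: '0' :: s) else s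
termination_by 8 - s.length
decreasing_by simp_all; omega

-- mapping[number] raises KeyError for a char not in mapping ('-' of a negative val): those inputs
-- are outside Pre_retSS; the getD default [] is never reached inside Pre_.
def retSS (val : Int) : Int :=
  let valStr := PySem.Int.toChars val
  let strEmp := valStr.foldl (fun acc c => acc ++ PySem.Dict.getD pvMapping c []) []
  pvHexVal (pvPad8 strEmp)

-- ===== PORT B =====
-- byteval = {d: int(h, 16) for d, h in mapping.items()}  (module-level, computed once)
def pvByteval : PySem.Dict Char Int :=
  PySem.Dict.ofList (pvMapping.items.map fun p => (p.1, (PySem.Int.ofCharsBase? p.2 16).getD 0))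

-- byteval[d] raises KeyError exactly where A's mapping[d] does: outside Pre_retSS (default 0 unreached)
def retSS_alt (val : Int) : Int :=
  let bv := (PySem.Int.toChars val).map fun d => PySem.Dict.getD pvByteval d 0
  let bv2 := List.replicate (4 - bv.length) 64 ++ bv
  bv2.foldl (fun r b => r * 256 + b) 0

-- ===== PRECONDITION & SPEC =====
-- Pre_ excludes exactly val < 0: there str(val) starts with '-', which is not a key of mapping,
-- so both A and B raise KeyError.
def Pre_retSS (val : Int) : Prop := 0 ≤ val
instance (val : Int) : Decidable (Pre_retSS val) := by unfold Pre_retSS; infer_instance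
def pvWitness_retSS : Int := (123)

def Spec_retSS (val : Int) (out : Int) : Prop := out = retSS_alt val
instance (val : Int) (out : Int) : Decidable (Spec_retSS val out) := by unfold Spec_retSS; infer_instance

-- ===== CLAIM (what is proved, stated in full; the proofs are below) =====
def Claim_equal_retSS : Prop := ∀ (val : Int), Dom_retSS val → Pre_retSS val → Spec_retSS val (retSS val)

-- ===== LEMMAS AND PROOFS =====

-- the ten decimal digit chars
def pvDig (c : Char) : Prop := c ∈ ['0','1','2','3','4','5','6','7','8','9']

theorem pvDig_digitChar (n : Nat) (h : n < 10) : pvDig (Nat.digitChar n) := by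
  interval_cases n <;> (unfold pvDig; decide)

theorem pvDig_toDigitsCore (f : Nat) : ∀ (n : Nat) (acc : List Char), (∀ c ∈ acc, pvDig c) →
    ∀ c ∈ Nat.toDigitsCore 10 f n acc, pvDig c := by
  induction f with
  | zero => intro n acc hacc; simpa [Nat.toDigitsCore] using hacc
  | succ f ih =>
    intro n acc hacc c hc
    simp only [Nat.toDigitsCore] at hc
    have hd : pvDig (Nat.digitChar (n % 10)) := pvDig_digitChar _ (Nat.mod_lt _ (by norm_num))
    by_cases h0 : n / 10 = 0
    · simp only [h0] at hc
      rcases List.mem_cons.mp hc with rfl | hc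
      · exact hd
      · exact hacc _ hc
    · rw [if_neg h0] at hc
      exact ih _ _ (by intro x hx; rcases List.mem_cons.mp hx with rfl | hx; exacts [hd, hacc _ hx]) _ hc

theorem pvDig_toChars (val : Int) (h : 0 ≤ val) : ∀ c ∈ PySem.Int.toChars val, pvDig c := by
  have : ¬ val < 0 := not_lt.mpr h
  simp only [PySem.Int.toChars, if_neg this, Nat.toDigits]
  exact pvDig_toDigitsCore _ _ _ (by simp)

-- one digit char: its two mapping chars fold to one base-256 Horner step with its byteval entry
theorem pv_pair {c h1 h2 : Char} {b : Int}
    (hm : PySem.Dict.getD pvMapping c [] = [h1, h2])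
    (hb : PySem.Dict.getD pvByteval c 0 = b)
    (hv : 16 * pvHexDigit h1 + pvHexDigit h2 = b) (a : Int) :
    List.foldl (fun a c => a * 16 + pvHexDigit c) a (PySem.Dict.getD pvMapping c []) =
      a * 256 + PySem.Dict.getD pvByteval c 0 := by
  rw [hm, hb, ← hv]
  simp only [List.foldl_cons, List.foldl_nil]
  ring

theorem pv_pair_step (c : Char) (h : pvDig c) (a : Int) :
    List.foldl (fun a c => a * 16 + pvHexDigit c) a (PySem.Dict.getD pvMapping c []) =
      a * 256 + PySem.Dict.getD pvByteval c 0 := by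
  unfold pvDig at h
  fin_cases h <;> exact pv_pair rfl rfl (by decide) a

theorem pv_pair_len (c : Char) (h : pvDig c) : (PySem.Dict.getD pvMapping c []).length = 2 := by
  unfold pvDig at h; fin_cases h <;> decide

-- Horner correspondence over a list of digit chars
theorem pv_horner (cs : List Char) (h : ∀ c ∈ cs, pvDig c) : ∀ a : Int,
    List.foldl (fun a c => a * 16 + pvHexDigit c)
        a (cs.flatMap fun c => PySem.Dict.getD pvMapping c []) =
      List.foldl (fun r b => r * 256 + b) a (cs.map fun d => PySem.Dict.getD pvByteval d 0) := by
  induction cs with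
  | nil => intro a; simp
  | cons c cs ih =>
    intro a
    simp only [List.flatMap_cons, List.map_cons, List.foldl_append, List.foldl_cons]
    rw [pv_pair_step c (h c (by simp)) a]
    exact ih (fun x hx => h x (by simp [hx])) _

theorem pv_flatMap_len (cs : List Char) (h : ∀ c ∈ cs, pvDig c) :
    (cs.flatMap fun c => PySem.Dict.getD pvMapping c []).length = 2 * cs.length := by
  induction cs with
  | nil => simp
  | cons c cs ih =>
    simp only [List.flatMap_cons, List.length_append, List.length_cons,
      pv_pair_len c (h c (by simp)), ih (fun x hx => h x (by simp [hx]))]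
    ring

theorem pvPad8_of_ge (s : List Char) (h : 8 ≤ s.length) : pvPad8 s = s := by
  rw [pvPad8, if_neg (by omega)]

theorem pvPad8_exact : ∀ (n : Nat) (s : List Char), s.length + 2 * n = 8 →
    pvPad8 s = (List.replicate n ['4','0']).flatten ++ s := by
  intro n
  induction n with
  | zero => intro s hs; simp [pvPad8_of_ge s (by omega)]
  | succ n ih =>
    intro s hs
    rw [pvPad8, if_pos (by omega)]
    rw [ih ('4' :: '0' :: s) (by simp; omega)]
    simp [List.replicate_succ', List.flatten_append, List.append_assoc]

theorem pv_flatMap_replicate (n : Nat) :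
    ((List.replicate n '0').flatMap fun c => PySem.Dict.getD pvMapping c []) =
      (List.replicate n ['4','0']).flatten := by
  induction n with
  | zero => simp
  | succ n ih =>
    simp only [List.replicate_succ, List.flatMap_cons, List.flatten_cons, ih,
      show PySem.Dict.getD pvMapping '0' [] = ['4','0'] from by decide]

-- the padded hex string is exactly the string of the '0'-padded digit list
theorem pv_pad_flatMap (cs : List Char) (h : ∀ c ∈ cs, pvDig c) :
    pvPad8 (cs.flatMap fun c => PySem.Dict.getD pvMapping c []) =
      ((List.replicate (4 - cs.length) '0' ++ cs).flatMap
        fun c => PySem.Dict.getD pvMapping c []) := by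
  by_cases h4 : 4 ≤ cs.length
  · rw [pvPad8_of_ge _ (by rw [pv_flatMap_len cs h]; omega)]
    simp [Nat.sub_eq_zero_of_le h4]
  · rw [pvPad8_exact (4 - cs.length) _ (by rw [pv_flatMap_len cs h]; omega)]
    rw [List.flatMap_append, pv_flatMap_replicate]

-- ===== VERDICT (by name: the statement is the Claim_ definition above) =====
theorem retSS_spec : Claim_equal_retSS := by
  intro val _ hpre
  unfold Spec_retSS retSS retSS_alt
  simp only [PySem.List.foldl_append_eq_flatMap, List.nil_append]
  have hd := pvDig_toChars val hpre
  set cs := PySem.Int.toChars val with hcs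
  rw [pvHexVal, pv_pad_flatMap cs hd, pv_horner _ (by
    intro c hc
    rcases List.mem_append.mp hc with hc | hc
    · rw [List.eq_of_mem_replicate hc]; unfold pvDig; decide
    · exact hd c hc)]
  have hpadmap : ((List.replicate (4 - cs.length) '0' ++ cs).map
      fun d => PySem.Dict.getD pvByteval d 0) =
      List.replicate (4 - cs.length) 64 ++ (cs.map fun d => PySem.Dict.getD pvByteval d 0) := by
    rw [List.map_append, List.map_replicate,
      show PySem.Dict.getD pvByteval '0' 0 = 64 from by decide]
  rw [hpadmap]
  simp [List.length_map]
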